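-- pv_equiv track=rewrite | github.com/trace86/jhu-aai | AlphaToe/state_mapping/mapping_old.py | horizontal_left_search
-- ===== SOURCE A (Python) =====
-- def horizontal_left_search(i, j, matrix, num_neighbors, symbol):
--     min_i = 0
--     min_j = 0
--     max_i = len(matrix) - 1
--     max_j = len(matrix[0]) - 1
--
--     xs = []
--     for n in range(1, num_neighbors + 1):
--         _i = i
--         _j = j - n
--         if _i >= min_i and _j >= min_j and _i <= max_i and _j <= max_j:
--             xs.append(matrix[_i][_j])
--     if len(xs) != num_neighbors:
--         return False
--     return all(item == symbol for item in xs)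
-- ===== SOURCE B (Python) =====
-- def horizontal_left_search(i, j, matrix, num_neighbors, symbol):
--     max_i = len(matrix) - 1
--     max_j = len(matrix[0]) - 1
--     if num_neighbors == 0:
--         return True
--     if num_neighbors < 0:
--         return False
--     if not (0 <= i <= max_i and j - num_neighbors >= 0 and j - 1 <= max_j):
--         return False
--     row = matrix[i]
--     return all(row[j - n] == symbol for n in range(1, num_neighbors + 1))
-- ===== Notes on version B (the rewrite author's own statement) =====
-- stated objective: simpler
-- what changed: Replaces A's per-cell bounds filtering into an intermediate list plus a length-vs-count comparison by one up-front closed-form range test (0<=i<=max_i, j-num_neighbors>=0, j-1<=max_j) followed by a direct all() over the cells, with explicit early returns for num_neighbors==0 and <0.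
import Mathlib
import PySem

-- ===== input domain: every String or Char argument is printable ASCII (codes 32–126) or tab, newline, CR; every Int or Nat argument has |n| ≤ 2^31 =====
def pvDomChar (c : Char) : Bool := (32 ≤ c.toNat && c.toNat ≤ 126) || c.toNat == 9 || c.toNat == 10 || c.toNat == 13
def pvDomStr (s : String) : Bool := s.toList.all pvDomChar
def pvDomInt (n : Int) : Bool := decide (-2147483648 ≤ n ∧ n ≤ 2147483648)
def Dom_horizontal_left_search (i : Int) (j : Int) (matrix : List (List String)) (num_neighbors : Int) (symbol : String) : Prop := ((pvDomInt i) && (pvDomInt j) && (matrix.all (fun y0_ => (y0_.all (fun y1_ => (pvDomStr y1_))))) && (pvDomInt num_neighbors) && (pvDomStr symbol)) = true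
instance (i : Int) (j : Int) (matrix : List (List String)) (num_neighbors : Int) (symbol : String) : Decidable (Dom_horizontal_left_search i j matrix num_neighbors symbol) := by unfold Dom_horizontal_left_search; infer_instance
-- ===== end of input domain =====

-- B replaces A's per-cell bounds filtering + list/length bookkeeping with one up-front
-- closed-form range test and a direct all() over the cells (objective: simpler).

-- ===== PORT A =====
def horizontal_left_search (i : Int) (j : Int) (matrix : List (List String)) (num_neighbors : Int) (symbol : String) : Bool :=
  let max_i : Int := (matrix.length : Int) - 1
  let max_j : Int := ((matrix.headD []).length : Int) - 1   -- matrix[0]; empty matrix excluded by Pre_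
  let xs : List String := (PySem.List.pyRange 1 (num_neighbors + 1) 1).foldl
    (fun acc n =>
      let _i := i
      let _j := j - n
      if _i ≥ 0 ∧ _j ≥ 0 ∧ _i ≤ max_i ∧ _j ≤ max_j then
        -- matrix[_i][_j]; in range under Pre_, so the defaults are never taken
        acc ++ [PySem.List.pyGetD (PySem.List.pyGetD matrix _i []) _j ""]
      else acc) []
  if (xs.length : Int) ≠ num_neighbors then false
  else xs.all (fun item => item == symbol)

-- ===== PORT B =====
def horizontal_left_search_alt (i : Int) (j : Int) (matrix : List (List String)) (num_neighbors : Int) (symbol : String) : Bool :=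
  let max_i : Int := (matrix.length : Int) - 1
  let max_j : Int := ((matrix.headD []).length : Int) - 1   -- matrix[0]; empty matrix excluded by Pre_
  if num_neighbors = 0 then true
  else if num_neighbors < 0 then false
  else if ¬(0 ≤ i ∧ i ≤ max_i ∧ j - num_neighbors ≥ 0 ∧ j - 1 ≤ max_j) then false
  else
    let row := PySem.List.pyGetD matrix i []      -- matrix[i]; in range in this branch
    (PySem.List.pyRange 1 (num_neighbors + 1) 1).all
      (fun n => PySem.List.pyGetD row (j - n) "" == symbol)

-- ===== PRECONDITION & SPEC =====
-- Pre_ excludes exactly the inputs on which the Python A raises IndexError: the empty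
-- matrix (matrix[0]), and ragged matrices where a cell that passes A's row-0-based bounds
-- check lies beyond the end of the (shorter) row i.
def Pre_horizontal_left_search (i : Int) (j : Int) (matrix : List (List String)) (num_neighbors : Int) (symbol : String) : Prop :=
  matrix ≠ [] ∧
  ¬(0 ≤ i ∧ i < (matrix.length : Int) ∧ 1 ≤ num_neighbors ∧ 1 ≤ j ∧
    j - num_neighbors ≤ ((matrix.headD []).length : Int) - 1 ∧
    ((PySem.List.pyGetD matrix i []).length : Int) ≤ min (j - 1) (((matrix.headD []).length : Int) - 1))
instance (i : Int) (j : Int) (matrix : List (List String)) (num_neighbors : Int) (symbol : String) : Decidable (Pre_horizontal_left_search i j matrix num_neighbors symbol) := by unfold Pre_horizontal_left_search; infer_instance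

def pvWitness_horizontal_left_search : Int × Int × List (List String) × Int × String := (0, 1, [["x"]], 1, "x")

def Spec_horizontal_left_search (i : Int) (j : Int) (matrix : List (List String)) (num_neighbors : Int) (symbol : String) (out : Bool) : Prop := out = horizontal_left_search_alt i j matrix num_neighbors symbol
instance (i : Int) (j : Int) (matrix : List (List String)) (num_neighbors : Int) (symbol : String) (out : Bool) : Decidable (Spec_horizontal_left_search i j matrix num_neighbors symbol out) := by unfold Spec_horizontal_left_search; infer_instance

-- ===== CLAIM (what is proved, stated in full; the proofs are below) =====
def Claim_equal_horizontal_left_search : Prop := ∀ (i : Int) (j : Int) (matrix : List (List String)) (num_neighbors : Int) (symbol : String), Dom_horizontal_left_search i j matrix num_neighbors symbol → Pre_horizontal_left_search i j matrix num_neighbors symbol → Spec_horizontal_left_search i j matrix num_neighbors symbol (horizontal_left_search i j matrix num_neighbors symbol)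

-- ===== LEMMAS AND PROOFS =====

-- A's foldl filters the range into a list; characterize it as filter-then-map.
theorem hls_xs_eq (i j : Int) (matrix : List (List String)) (nn : Int) :
    ((PySem.List.pyRange 1 (nn + 1) 1).foldl
      (fun acc n =>
        if i ≥ 0 ∧ j - n ≥ 0 ∧ i ≤ (matrix.length : Int) - 1 ∧
            j - n ≤ ((matrix.headD []).length : Int) - 1 then
          acc ++ [PySem.List.pyGetD (PySem.List.pyGetD matrix i []) (j - n) ""]
        else acc) ([] : List String))
    = ((PySem.List.pyRange 1 (nn + 1) 1).filter
        (fun n => decide (i ≥ 0 ∧ j - n ≥ 0 ∧ i ≤ (matrix.length : Int) - 1 ∧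
            j - n ≤ ((matrix.headD []).length : Int) - 1))).map
        (fun n => PySem.List.pyGetD (PySem.List.pyGetD matrix i []) (j - n) "") := by
  simpa using PySem.List.foldl_append_ite
    (p := fun n => i ≥ 0 ∧ j - n ≥ 0 ∧ i ≤ (matrix.length : Int) - 1 ∧
        j - n ≤ ((matrix.headD []).length : Int) - 1)
    (f := fun n => PySem.List.pyGetD (PySem.List.pyGetD matrix i []) (j - n) "")
    (l := PySem.List.pyRange 1 (nn + 1) 1) (acc := [])

-- ===== VERDICT (by name: the statement is the Claim_ definition above) =====
theorem horizontal_left_search_spec : Claim_equal_horizontal_left_search := by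
  intro i j matrix nn symbol _ _
  unfold Spec_horizontal_left_search horizontal_left_search horizontal_left_search_alt
  simp only []
  rw [hls_xs_eq]
  set mi : Int := (matrix.length : Int) - 1 with hmi
  set mj : Int := ((matrix.headD []).length : Int) - 1 with hmj
  set p : Int → Bool := fun n => decide (i ≥ 0 ∧ j - n ≥ 0 ∧ i ≤ mi ∧ j - n ≤ mj) with hp
  set f : Int → String := fun n => PySem.List.pyGetD (PySem.List.pyGetD matrix i []) (j - n) "" with hf
  by_cases h0 : nn = 0
  · subst h0
    simp
  · by_cases hneg : nn < 0
    · rw [PySem.List.pyRange_one_eq_nil (by omega : nn + 1 ≤ 1)]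
      simp [h0, hneg]
      omega
    · -- nn ≥ 1
      have h1 : 1 ≤ nn := by omega
      have hlen : (PySem.List.pyRange 1 (nn + 1) 1).length = nn.toNat := by
        rw [PySem.List.length_pyRange_one]; omega
      by_cases hv : 0 ≤ i ∧ i ≤ mi ∧ j - nn ≥ 0 ∧ j - 1 ≤ mj
      · -- valid: every n in the range passes the bounds check
        have hall : ∀ n ∈ PySem.List.pyRange 1 (nn + 1) 1, p n = true := by
          intro n hn
          rw [PySem.List.mem_pyRange_one] at hn
          simp only [hp, decide_eq_true_eq]
          omega
        have hfe : (PySem.List.pyRange 1 (nn + 1) 1).filter p = PySem.List.pyRange 1 (nn + 1) 1 :=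
          List.filter_eq_self.mpr hall
        rw [hfe]
        simp only [List.length_map, hlen, h0, hneg, hv, if_false, List.all_map]
        have : ¬ ((nn.toNat : Int) ≠ nn) := by omega
        simp only [this, if_false, Function.comp_def, hf]
        simp
      · -- invalid: some n in the range fails, so the filtered list is short
        have hx : ∃ n ∈ PySem.List.pyRange 1 (nn + 1) 1, ¬ p n = true := by
          by_cases hi : 0 ≤ i ∧ i ≤ mi
          · by_cases hj : j - nn ≥ 0
            · -- then j - 1 > mj must fail; n = 1 fails
              refine ⟨1, ?_, ?_⟩
              · rw [PySem.List.mem_pyRange_one]; omega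
              · simp only [hp, decide_eq_true_eq]; omega
            · refine ⟨nn, ?_, ?_⟩
              · rw [PySem.List.mem_pyRange_one]; omega
              · simp only [hp, decide_eq_true_eq]; omega
          · refine ⟨1, ?_, ?_⟩
            · rw [PySem.List.mem_pyRange_one]; omega
            · simp only [hp, decide_eq_true_eq]; omega
        have hlt : ((PySem.List.pyRange 1 (nn + 1) 1).filter p).length
            < (PySem.List.pyRange 1 (nn + 1) 1).length := by
          obtain ⟨n, hn, hpn⟩ := hx
          exact List.length_filter_lt_length_iff_exists.mpr ⟨n, hn, by simpa using hpn⟩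
        rw [hlen] at hlt
        have hne : ((((PySem.List.pyRange 1 (nn + 1) 1).filter p).map f).length : Int) ≠ nn := by
          rw [List.length_map]; omega
        have hcf : ¬ (((PySem.List.pyRange 1 (nn + 1) 1).filter p).length : Int) = nn := by omega
        have hb : (decide (0 ≤ i) && (decide (i ≤ mi) && (decide (nn ≤ j) && !decide (mj + 1 < j)))) = false := by
          by_contra hc
          simp at hc
          omega
        simp [hcf, h0, hneg, hb]
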